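-- pv_equiv track=rewrite | github.com/TheoRiffel/Finantial-Info-Benchmark | scripts/run_benchmark.py | _pick_smoke
-- ===== SOURCE A (Python) =====
-- SMOKE_N = 3
--
-- def _pick_smoke(queries: list[dict]) -> list[dict]:
--     """One query per category, up to SMOKE_N total."""
--     seen: set[str] = set()
--     picked: list[dict] = []
--     for q in queries:
--         cat = q.get("category", "")
--         if cat not in seen:
--             picked.append(q)
--             seen.add(cat)
--         if len(picked) >= SMOKE_N:
--             break
--     return picked or queries[:SMOKE_N]
-- ===== SOURCE B (Python) =====
-- SMOKE_N = 3
--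
-- def _pick_smoke(queries: list[dict]) -> list[dict]:
--     """One query per category, up to SMOKE_N total."""
--     def sieve(qs: list[dict], n: int) -> list[dict]:
--         if n == 0 or not qs:
--             return []
--         head = qs[0]
--         cat = head.get("category", "")
--         rest = [q for q in qs[1:] if q.get("category", "") != cat]
--         return [head] + sieve(rest, n - 1)
--     return sieve(queries, SMOKE_N) or queries[:SMOKE_N]
-- ===== Notes on version B (the rewrite author's own statement) =====
-- stated objective: alternative
-- what changed: Replaces the seen-set/picked-list loop with early break by an Eratosthenes-style recursive sieve: take the head query, filter every later query of the same category out of the tail, recurse with the budget decremented; no seen set, no running picked list, no break.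
import Mathlib
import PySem

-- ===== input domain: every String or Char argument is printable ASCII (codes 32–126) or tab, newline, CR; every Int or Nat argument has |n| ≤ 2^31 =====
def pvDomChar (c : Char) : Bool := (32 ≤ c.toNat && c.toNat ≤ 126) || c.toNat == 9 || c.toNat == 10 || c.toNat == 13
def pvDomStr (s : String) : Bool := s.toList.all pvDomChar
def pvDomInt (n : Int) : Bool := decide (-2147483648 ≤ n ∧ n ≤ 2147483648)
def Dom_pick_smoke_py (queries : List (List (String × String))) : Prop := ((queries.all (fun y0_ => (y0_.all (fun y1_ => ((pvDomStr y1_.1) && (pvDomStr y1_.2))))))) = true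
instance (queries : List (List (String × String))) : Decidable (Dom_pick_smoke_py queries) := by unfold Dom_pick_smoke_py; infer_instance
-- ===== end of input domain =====

-- One honest line: B replaces A's seen-set/picked-list loop with early break by a
-- recursive sieve (pick the head, filter its category out of the tail, recurse with
-- the budget decremented) — an alternative decomposition of the same cost.

-- q.get("category", "") on the assoc-list dict q (first match, per the type convention)
def pvCat (q : List (String × String)) : String :=
  PySem.Dict.getD (PySem.Dict.mk q) "category" ""

-- ===== PORT A =====
-- the for-loop of A: state (seen, picked), break as soon as len(picked) >= 3
def pvLoopA (seen : PySem.Set String) (picked : List (List (String × String))) :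
    List (List (String × String)) → List (List (String × String))
  | [] => picked
  | q :: qs =>
    let cat := pvCat q
    let st := if PySem.Set.contains seen cat then (seen, picked)
              else (PySem.Set.add seen cat, picked ++ [q])
    if 3 ≤ st.2.length then st.2 else pvLoopA st.1 st.2 qs

def pick_smoke_py (queries : List (List (String × String))) : List (List (String × String)) :=
  let picked := pvLoopA PySem.Set.empty [] queries
  if picked.isEmpty then PySem.List.slice queries none (some 3) else picked

-- ===== PORT B =====
-- Source B's inner sieve: budget n, head query, tail filtered against the head's category
def pvSieve : Nat → List (List (String × String)) → List (List (String × String))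
  | 0, _ => []
  | _ + 1, [] => []
  | n + 1, q :: qs =>
    q :: pvSieve n (qs.filter (fun r => pvCat r ≠ pvCat q))

def pick_smoke_py_alt (queries : List (List (String × String))) : List (List (String × String)) :=
  let picked := pvSieve 3 queries
  if picked.isEmpty then PySem.List.slice queries none (some 3) else picked

-- ===== PRECONDITION & SPEC =====
def Spec_pick_smoke_py (queries : List (List (String × String))) (out : List (List (String × String))) : Prop := out = pick_smoke_py_alt queries
instance (queries : List (List (String × String))) (out : List (List (String × String))) : Decidable (Spec_pick_smoke_py queries out) := by unfold Spec_pick_smoke_py; infer_instance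

-- ===== CLAIM (what is proved, stated in full; the proofs are below) =====
def Claim_equal_pick_smoke_py : Prop := ∀ (queries : List (List (String × String))), Dom_pick_smoke_py queries → Spec_pick_smoke_py queries (pick_smoke_py queries)

-- ===== LEMMAS AND PROOFS =====

-- first query per not-yet-seen category, in order (characterisation of A's picks)
def pvFirsts (seen : List String) : List (List (String × String)) → List (List (String × String))
  | [] => []
  | q :: qs =>
    if seen.contains (pvCat q) then pvFirsts seen qs
    else q :: pvFirsts (seen ++ [pvCat q]) qs

theorem pvLoopA_eq_take (qs : List (List (String × String)))
    (seen : PySem.Set String) (picked : List (List (String × String)))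
    (h : picked.length < 3) :
    pvLoopA seen picked qs = (picked ++ pvFirsts seen qs).take 3 := by
  induction qs generalizing seen picked with
  | nil =>
    simp [pvLoopA, pvFirsts, List.take_of_length_le (by omega : picked.length ≤ 3)]
  | cons q qs ih =>
    by_cases hmem : pvCat q ∈ seen
    · have h1 : PySem.Set.contains seen (pvCat q) = true := by
        simp [hmem]
      have h2 : List.contains seen (pvCat q) = true := by
        simpa using hmem
      simp only [pvLoopA, pvFirsts, h1, h2, if_true]
      rw [if_neg (by simpa using by omega : ¬ 3 ≤ picked.length)]
      exact ih seen picked h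
    · have h1 : PySem.Set.contains seen (pvCat q) = false := by
        rw [Bool.eq_false_iff]
        intro hh
        exact hmem ((PySem.Set.contains_iff seen (pvCat q)).1 hh)
      have h2 : List.contains seen (pvCat q) = false := by
        simpa using hmem
      simp only [pvLoopA, pvFirsts, h1, h2, Bool.false_eq_true, if_false]
      rw [PySem.Set.add_of_not_mem hmem]
      by_cases h3 : (picked ++ [q]).length = 3
      · rw [if_pos (le_of_eq h3.symm)]
        have hassoc : picked ++ q :: pvFirsts (seen ++ [pvCat q]) qs
            = (picked ++ [q]) ++ pvFirsts (seen ++ [pvCat q]) qs := by simp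
        rw [hassoc, ← h3, List.take_left]
      · have hlt : (picked ++ [q]).length < 3 := by
          simp only [List.length_append, List.length_cons, List.length_nil] at h3 ⊢
          omega
        rw [if_neg (by omega)]
        have := ih (seen ++ [pvCat q]) (picked ++ [q]) hlt
        simpa using this

-- filtering out already-seen categories shifts the seen-set of pvFirsts
theorem pvFirsts_filter (qs : List (List (String × String))) (s t : List String) :
    pvFirsts t (qs.filter (fun q => !(s.contains (pvCat q)))) = pvFirsts (s ++ t) qs := by
  induction qs generalizing t with
  | nil => simp [pvFirsts]
  | cons q qs ih =>
    cases hs : List.contains s (pvCat q) with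
    | true =>
      have hst : List.contains (s ++ t) (pvCat q) = true := by
        simp only [List.contains_append, hs, Bool.true_or]
      simp only [List.filter_cons, hs, Bool.not_true, Bool.false_eq_true, if_false,
        pvFirsts, hst, if_true]
      exact ih t
    | false =>
      simp only [List.filter_cons, Bool.not_false, if_true, pvFirsts,
        List.contains_append, hs, Bool.false_or]
      cases ht : List.contains t (pvCat q) with
      | true => simpa [ht] using ih t
      | false =>
        simp only [Bool.false_eq_true, if_false, List.cons.injEq, true_and]
        rw [ih (t ++ [pvCat q]), List.append_assoc]

theorem pvSieve_eq_take (n : Nat) (qs : List (List (String × String))) :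
    pvSieve n qs = (pvFirsts [] qs).take n := by
  induction n generalizing qs with
  | zero => simp [pvSieve]
  | succ n ih =>
    cases qs with
    | nil => simp [pvSieve, pvFirsts]
    | cons q qs =>
      have hpred : (fun r => decide (pvCat r ≠ pvCat q))
          = (fun r => !(List.contains [pvCat q] (pvCat r))) := by
        funext r
        simp [decide_not, eq_comm]
      have hhead : pvFirsts [] (q :: qs) = q :: pvFirsts [pvCat q] qs := by
        simp [pvFirsts]
      rw [pvSieve, ih, hpred, pvFirsts_filter qs [pvCat q] [], hhead, List.take_succ_cons, List.append_nil]

-- ===== VERDICT (by name: the statement is the Claim_ definition above) =====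
theorem pick_smoke_py_spec : Claim_equal_pick_smoke_py := by
  intro queries _
  have hA : pvLoopA PySem.Set.empty [] queries = (pvFirsts [] queries).take 3 := by
    simpa using pvLoopA_eq_take queries PySem.Set.empty [] (by simp)
  have hB : pvSieve 3 queries = (pvFirsts [] queries).take 3 :=
    pvSieve_eq_take 3 queries
  simp only [Spec_pick_smoke_py, pick_smoke_py, pick_smoke_py_alt, hA, hB]
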